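-- pv_equiv track=rewrite | github.com/morgoth1145/advent-of-code | 2017/21/solution.py | get_all_symmetries
-- ===== SOURCE A (Python) =====
-- def get_all_symmetries(pattern):
--     grid = [list(line) for line in pattern.split('/')]
--
--     candidates = []
--
--     # Generate all rotations
--     for _ in range(4):
--         last, grid = grid, [l[:] for l in grid]
--
--         for x in range(len(last)):
--             for y in range(len(last[x])):
--                 grid[x][y] = last[len(grid[x])-y-1][x]
--
--         # Append both the grid and its vertical mirror to the candidate list
--         # Other mirrorings will be generated automatically by the 4 rotations
--         candidates.append(grid)
--         candidates.append(grid[::-1])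
--
--     candidates = ['/'.join(''.join(line) for line in grid)
--                   for grid in candidates]
--
--     return sorted(set(candidates))
-- ===== SOURCE B (Python) =====
-- def get_all_symmetries(pattern):
--     rows = pattern.split('/')
--     if all(r == '' for r in rows):
--         # a grid with no cells: the only symmetry is the pattern itself
--         return ['/'.join(rows)]
--     if any(len(r) != len(rows) for r in rows):
--         raise ValueError('not a square grid pattern')
--     cols = [''.join(c) for c in zip(*rows)]
--     images = []
--     for base in (rows, cols):
--         flipped = [row[::-1] for row in base]
--         images += [base, base[::-1], flipped, flipped[::-1]]
--     return sorted({'/'.join(image) for image in images})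
-- ===== Notes on version B (the rewrite author's own statement) =====
-- stated objective: simpler
-- what changed: B validates the pattern and then enumerates the symmetry group in closed form - the rows, their transpose (zip), and the row-order/row-content flips of each - instead of A's stateful loop that iterates an in-place index-arithmetic quarter-turn four times appending each stage with its mirror; Pre_ restricts to grid-shaped patterns (square, or all rows empty), since on other ragged shapes - which a grid pattern never is - B raises ValueError while A's index arithmetic sometimes happens to return an accidental reading of the ragged grid.
-- outside the precondition, e.g. on get_all_symmetries('.#/#'): A returns ['##/.', '#./#', '#/#.', '#/.#', '.#/#', './##'], B raises ValueError
import Mathlib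
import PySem

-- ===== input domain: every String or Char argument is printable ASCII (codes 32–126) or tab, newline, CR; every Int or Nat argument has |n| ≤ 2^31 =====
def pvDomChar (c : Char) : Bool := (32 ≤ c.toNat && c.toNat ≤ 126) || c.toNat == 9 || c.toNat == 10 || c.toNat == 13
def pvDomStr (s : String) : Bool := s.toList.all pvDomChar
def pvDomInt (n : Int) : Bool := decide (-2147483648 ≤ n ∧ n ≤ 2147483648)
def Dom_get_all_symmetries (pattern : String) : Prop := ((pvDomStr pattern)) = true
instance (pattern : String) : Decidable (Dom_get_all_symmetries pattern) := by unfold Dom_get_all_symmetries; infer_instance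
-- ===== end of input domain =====

-- B validates the pattern, then enumerates the symmetries in closed form (transpose + flips)
-- instead of iterating A's in-place quarter-turn four times: simpler. Pre_ restricts to
-- grid-shaped patterns (square, or all rows empty); elsewhere B raises ValueError.


-- ===== PORT A =====
-- one rotation pass of A: last, grid = grid, [l[:] for l in grid]; grid[x][y] = last[len(grid[x])-y-1][x]
def pvRotA (last : List (List Char)) : List (List Char) :=
  (List.range last.length).foldl (fun grid (x : Nat) =>
    (List.range (PySem.List.pyGetD last (x : Int) []).length).foldl (fun g (y : Nat) =>
      PySem.List.pySetD g (x : Int)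
        (PySem.List.pySetD (PySem.List.pyGetD g (x : Int) []) (y : Int)
          (PySem.List.pyGetD
            (PySem.List.pyGetD last
              (((PySem.List.pyGetD g (x : Int) []).length : Int) - (y : Int) - 1) [])
            (x : Int) ' ')))
      grid)
    last

-- grid = [list(line) for line in pattern.split('/')]  (a Python str is a List Char here);
-- for _ in range(4): rotate, then append grid and grid[::-1] (= reverse);
-- candidates = ['/'.join(''.join(line) for line in grid) for grid in candidates]; return sorted(set(candidates))
def get_all_symmetries (pattern : String) : List String :=
  let grid0 : List (List Char) := PySem.Chars.splitOn pattern.toList ['/']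
  let st := (List.range 4).foldl
    (fun (st : List (List Char) × List (List (List Char))) _ =>
      let grid := pvRotA st.1
      (grid, st.2 ++ [grid] ++ [grid.reverse]))
    (grid0, [])
  PySem.List.sorted
    (PySem.Set.ofList (st.2.map (fun g => String.ofList (PySem.Chars.join ['/'] g))))
    (fun s => s) false

-- ===== PORT B =====
-- cols = [''.join(c) for c in zip(*rows)] : zip truncates at the shortest row, so the number of
-- columns is the minimum row length (0 for no rows) and column x collects row[x] of every row.
def pvMinLen (g : List (List Char)) : Nat :=
  match g with
  | [] => 0
  | r :: rs => rs.foldl (fun m l => min m l.length) r.length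

def pvT (g : List (List Char)) : List (List Char) :=
  (List.range (pvMinLen g)).map (fun x => g.map (fun r => r.getD x ' '))

-- rows = pattern.split('/'); if all rows empty return ['/'.join(rows)]; if some row's length
-- differs from len(rows) raise ValueError (port returns [], outside Pre_); otherwise
-- images += [base, base[::-1], flipped, flipped[::-1]] for base in (rows, cols) with
-- flipped = [row[::-1] for row in base]; return sorted({'/'.join(im) …})
def get_all_symmetries_alt (pattern : String) : List String :=
  let rows : List (List Char) := PySem.Chars.splitOn pattern.toList ['/']
  if rows.all List.isEmpty then
    [String.ofList (PySem.Chars.join ['/'] rows)]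
  else if rows.any (fun r => decide (r.length ≠ rows.length)) then
    []
  else
    let cols := pvT rows
    let images := [rows, cols].foldl
      (fun (acc : List (List (List Char))) base =>
        let flipped := base.map List.reverse
        acc ++ [base, base.reverse, flipped, flipped.reverse]) []
    PySem.List.sorted
      (PySem.Set.ofList (images.map (fun x => String.ofList (PySem.Chars.join ['/'] x))))
      (fun s => s) false

-- ===== PRECONDITION & SPEC =====
-- Pre_ restricts to grid-shaped patterns: square (every row as long as the number of rows) or all
-- rows empty. On other, ragged shapes — which a grid pattern never is — A's index-arithmetic
-- rotation (when it happens not to raise) and B's transpose read the grid in ways nobody would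
-- specify, so neither value is the one being claimed.
def Pre_get_all_symmetries (pattern : String) : Prop :=
  (∀ r ∈ PySem.Chars.splitOn pattern.toList ['/'],
      r.length = (PySem.Chars.splitOn pattern.toList ['/']).length)
  ∨ (∀ r ∈ PySem.Chars.splitOn pattern.toList ['/'], r.length = 0)
instance (pattern : String) : Decidable (Pre_get_all_symmetries pattern) := by
  unfold Pre_get_all_symmetries; infer_instance

def pvWitness_get_all_symmetries : String := "##/#."

def Spec_get_all_symmetries (pattern : String) (out : List String) : Prop := out = get_all_symmetries_alt pattern
instance (pattern : String) (out : List String) : Decidable (Spec_get_all_symmetries pattern out) := by unfold Spec_get_all_symmetries; infer_instance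

-- ===== CLAIM (what is proved, stated in full; the proofs are below) =====
def Claim_equal_get_all_symmetries : Prop := ∀ (pattern : String), Dom_get_all_symmetries pattern → Pre_get_all_symmetries pattern → Spec_get_all_symmetries pattern (get_all_symmetries pattern)

-- ===== LEMMAS AND PROOFS =====

-- the closed form of one rotation pass of A
def pvRotG (g : List (List Char)) : List (List Char) :=
  (List.range g.length).map (fun x =>
    (List.range (g.getD x []).length).map (fun y =>
      (g.getD ((g.getD x []).length - 1 - y) []).getD x ' '))

theorem pvInnerA (last grid : List (List Char)) (x n k : Nat)
    (hx : x < grid.length) (hrow : (grid.getD x []).length = n) (hk : k ≤ n) :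
    (List.range k).foldl (fun g (y : Nat) =>
      PySem.List.pySetD g (x : Int)
        (PySem.List.pySetD (PySem.List.pyGetD g (x : Int) []) (y : Int)
          (PySem.List.pyGetD
            (PySem.List.pyGetD last
              (((PySem.List.pyGetD g (x : Int) []).length : Int) - (y : Int) - 1) [])
            (x : Int) ' '))) grid
    = grid.set x (((List.range k).map (fun y => (last.getD (n - 1 - y) []).getD x ' '))
        ++ (grid.getD x []).drop k) := by
  induction k with
  | zero =>
    simp only [List.range_zero, List.foldl_nil, List.map_nil, List.drop_zero, List.nil_append]
    rw [List.getD_eq_getElem grid [] hx, List.set_getElem_self]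
  | succ k ih =>
    have hk' : k ≤ n := by omega
    rw [List.range_succ, List.foldl_append, ih hk']
    simp only [List.foldl_cons, List.foldl_nil]
    set v := fun y => (last.getD (n - 1 - y) []).getD x ' ' with hv
    set R := ((List.range k).map v) ++ (grid.getD x []).drop k with hR
    have hxG : x < (grid.set x R).length := by simpa using hx
    have hGx : (grid.set x R).getD x [] = R := by
      rw [List.getD_eq_getElem _ [] hxG]; simp
    have hRlen : R.length = n := by
      rw [hR]
      simp only [List.length_append, List.length_map, List.length_range, List.length_drop, hrow]
      omega
    simp only [PySem.List.pyGetD_natCast, PySem.List.pySetD_natCast]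
    rw [hGx, hRlen]
    have hidx : ((n : Int) - (k : Int) - 1) = ((n - 1 - k : Nat) : Int) := by omega
    rw [hidx, PySem.List.pyGetD_natCast]
    rw [List.set_set]
    congr 1
    have hksml : k < (grid.getD x []).length := by omega
    rw [hR, List.set_append_right _ _ (by simp)]
    simp only [List.length_map, List.length_range, Nat.sub_self]
    rw [List.drop_eq_getElem_cons hksml, List.set_cons_zero]
    simp [hv, List.getD_eq_getElem?_getD]

theorem pvOuterA (last : List (List Char)) (k : Nat) (hk : k ≤ last.length) :
    (List.range k).foldl (fun grid (x : Nat) =>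
      (List.range (PySem.List.pyGetD last (x : Int) []).length).foldl (fun g (y : Nat) =>
        PySem.List.pySetD g (x : Int)
          (PySem.List.pySetD (PySem.List.pyGetD g (x : Int) []) (y : Int)
            (PySem.List.pyGetD
              (PySem.List.pyGetD last
                (((PySem.List.pyGetD g (x : Int) []).length : Int) - (y : Int) - 1) [])
              (x : Int) ' '))) grid) last
    = ((List.range k).map (fun x => (List.range (last.getD x []).length).map
        (fun y => (last.getD ((last.getD x []).length - 1 - y) []).getD x ' '))) ++ last.drop k := by
  induction k with
  | zero => simp
  | succ k ih =>
    have hk' : k ≤ last.length := by omega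
    rw [List.range_succ, List.foldl_append, ih hk']
    simp only [List.foldl_cons, List.foldl_nil]
    set rowmap := fun x => (List.range (last.getD x []).length).map
      (fun y => (last.getD ((last.getD x []).length - 1 - y) []).getD x ' ') with hrm
    set G := ((List.range k).map rowmap) ++ last.drop k with hG
    have hmk : ((List.range k).map rowmap).length = k := by simp
    have hGlen : G.length = last.length := by
      rw [hG]; simp only [List.length_append, List.length_map, List.length_range, List.length_drop]
      omega
    have hkn : k < last.length := by omega
    have hGk : G.getD k [] = last.getD k [] := by
      rw [List.getD_eq_getElem?_getD, List.getD_eq_getElem?_getD, hG,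
          List.getElem?_append_right (by simp), hmk]
      simp [List.getElem?_drop]
    set m := (last.getD k []).length with hm
    have hrowlen : (G.getD k []).length = m := by rw [hGk]
    have hlen2 : (PySem.List.pyGetD last (k : Int) []).length = m := by
      rw [PySem.List.pyGetD_natCast]
    rw [hlen2, pvInnerA last G k m m (by omega) hrowlen (le_refl m)]
    have hdrop : (G.getD k []).drop m = [] := by
      apply List.drop_eq_nil_of_le; omega
    rw [hdrop, List.append_nil]
    rw [hG, List.set_append_right _ _ (by simp)]
    simp only [hmk, Nat.sub_self]
    have hklt : k < last.length := by omega
    rw [List.drop_eq_getElem_cons hklt, List.set_cons_zero]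
    simp [hrm, hm, List.getD_eq_getElem?_getD]

theorem pvRotA_eq (g : List (List Char)) : pvRotA g = pvRotG g := by
  unfold pvRotA pvRotG
  rw [pvOuterA g g.length (le_refl _)]
  simp

-- square grids and their entries
def pvSq (n : Nat) (g : List (List Char)) : Prop :=
  g.length = n ∧ ∀ r ∈ g, r.length = n

def pvE (g : List (List Char)) (x y : Nat) : Char := (g.getD x []).getD y ' '

theorem pvSq_row (n : Nat) (g : List (List Char)) (hg : pvSq n g) (x : Nat) (hx : x < n) :
    (g.getD x []).length = n := by
  obtain ⟨hl, hr⟩ := hg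
  rw [List.getD_eq_getElem g [] (by omega)]
  exact hr _ (List.getElem_mem _)

theorem pvMinLen_sq (n : Nat) (g : List (List Char)) (hg : pvSq n g) : pvMinLen g = n := by
  obtain ⟨hl, hr⟩ := hg
  cases g with
  | nil => simpa using hl.symm ▸ rfl
  | cons r rs =>
    unfold pvMinLen
    have hrn : r.length = n := hr r (by simp)
    have : ∀ l ∈ rs, l.length = n := fun l hl' => hr l (by simp [hl'])
    clear hr hl
    induction rs with
    | nil => simpa using hrn
    | cons a as ih =>
      simp only [List.foldl_cons]
      have ha : a.length = n := this a (by simp)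
      have hstep : min r.length a.length = r.length := by rw [hrn, ha]; omega
      rw [hstep]
      exact ih (fun l hl' => this l (by simp [hl']))

theorem pvSq_T (n : Nat) (g : List (List Char)) (hg : pvSq n g) : pvSq n (pvT g) := by
  refine ⟨by simp [pvT, pvMinLen_sq n g hg], ?_⟩
  intro r hr
  simp only [pvT, List.mem_map, List.mem_range] at hr
  obtain ⟨x, _, rfl⟩ := hr
  simp [hg.1]

theorem pvE_T (n : Nat) (g : List (List Char)) (x y : Nat) (hg : pvSq n g)
    (hx : x < n) (hy : y < n) : pvE (pvT g) x y = pvE g y x := by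
  have hl : g.length = n := hg.1
  have hm : pvMinLen g = n := pvMinLen_sq n g hg
  unfold pvE pvT
  rw [List.getD_eq_getElem _ [] (by simp [hm, hx])]
  simp only [List.getElem_map, List.getElem_range]
  rw [List.getD_eq_getElem _ ' ' (by simp [hl, hy])]
  simp only [List.getElem_map]
  rw [List.getD_eq_getElem g [] (by omega : y < g.length)]

theorem pvSq_rev (n : Nat) (g : List (List Char)) (hg : pvSq n g) : pvSq n g.reverse :=
  ⟨by simp [hg.1], fun r hr => hg.2 r (List.mem_reverse.mp hr)⟩

theorem pvE_rev (n : Nat) (g : List (List Char)) (x y : Nat) (hg : pvSq n g) (hx : x < n) :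
    pvE g.reverse x y = pvE g (n - 1 - x) y := by
  have hl : g.length = n := hg.1
  unfold pvE
  rw [List.getD_eq_getElem _ [] (by simp [hl, hx]), List.getElem_reverse,
      List.getD_eq_getElem g [] (by omega : n - 1 - x < g.length)]
  congr 2
  omega

theorem pvSq_maprev (n : Nat) (g : List (List Char)) (hg : pvSq n g) :
    pvSq n (g.map List.reverse) := by
  refine ⟨by simp [hg.1], ?_⟩
  intro r hr
  simp only [List.mem_map] at hr
  obtain ⟨a, ha, rfl⟩ := hr
  simp [hg.2 a ha]

theorem pvE_maprev (n : Nat) (g : List (List Char)) (x y : Nat) (hg : pvSq n g)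
    (hx : x < n) (hy : y < n) : pvE (g.map List.reverse) x y = pvE g x (n - 1 - y) := by
  obtain ⟨hl, hr⟩ := hg
  have hxg : x < g.length := by omega
  unfold pvE
  rw [List.getD_eq_getElem _ [] (by simp [hl, hx]), List.getElem_map]
  have hrow : (g[x]'hxg).length = n := hr _ (List.getElem_mem _)
  rw [List.getD_eq_getElem _ ' ' (by simp [hrow, hy]), List.getElem_reverse,
      List.getD_eq_getElem g [] hxg,
      List.getD_eq_getElem _ ' ' (by omega : n - 1 - y < (g[x]'hxg).length)]
  congr 1
  omega

theorem pvSq_rotG (n : Nat) (g : List (List Char)) (hg : pvSq n g) : pvSq n (pvRotG g) := by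
  refine ⟨by simp [pvRotG, hg.1], ?_⟩
  intro r hrm
  simp only [pvRotG, List.mem_map, List.mem_range] at hrm
  obtain ⟨x, hx, rfl⟩ := hrm
  have hl : g.length = n := hg.1
  simp only [List.length_map, List.length_range]
  exact pvSq_row n g hg x (by omega : x < n)

theorem pvRotG_row (g : List (List Char)) (x : Nat) (hx : x < g.length) :
    (pvRotG g).getD x []
      = (List.range (g.getD x []).length).map (fun y =>
          (g.getD ((g.getD x []).length - 1 - y) []).getD x ' ') := by
  rw [List.getD_eq_getElem _ [] (by simp [pvRotG, hx])]
  simp [pvRotG]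

theorem pvE_rotG (n : Nat) (g : List (List Char)) (x y : Nat) (hg : pvSq n g)
    (hx : x < n) (hy : y < n) : pvE (pvRotG g) x y = pvE g (n - 1 - y) x := by
  have hl : g.length = n := hg.1
  have hrow := pvSq_row n g hg x hx
  unfold pvE
  rw [pvRotG_row g x (by omega), hrow,
      List.getD_eq_getElem _ ' ' (by simp [hy])]
  simp only [List.getElem_map, List.getElem_range]

theorem pvEq_of_entries (n : Nat) (a b : List (List Char)) (ha : pvSq n a) (hb : pvSq n b)
    (h : ∀ x y, x < n → y < n → pvE a x y = pvE b x y) : a = b := by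
  apply List.ext_getElem (by rw [ha.1, hb.1])
  intro x hx1 hx2
  have hxn : x < n := by have := ha.1; omega
  have hra : a[x].length = n := ha.2 _ (List.getElem_mem _)
  have hrb : b[x].length = n := hb.2 _ (List.getElem_mem _)
  apply List.ext_getElem (by rw [hra, hrb])
  intro y hy1 hy2
  have hyn : y < n := by omega
  have hxy := h x y hxn hyn
  unfold pvE at hxy
  rwa [List.getD_eq_getElem a [] hx1, List.getD_eq_getElem b [] hx2,
       List.getD_eq_getElem _ ' ' hy1, List.getD_eq_getElem _ ' ' hy2] at hxy

-- the four rotation stages of A in terms of B's transpose and flips (square grids)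
theorem pvRot1 (n : Nat) (g : List (List Char)) (hg : pvSq n g) :
    pvRotG g = (pvT g).map List.reverse := by
  apply pvEq_of_entries n _ _ (pvSq_rotG n g hg) (pvSq_maprev n _ (pvSq_T n g hg))
  intro x y hx hy
  rw [pvE_rotG n g x y hg hx hy, pvE_maprev n _ x y (pvSq_T n g hg) hx hy,
      pvE_T n g x (n - 1 - y) hg hx (by omega)]

theorem pvRot2 (n : Nat) (g : List (List Char)) (hg : pvSq n g) :
    pvRotG ((pvT g).map List.reverse) = (g.map List.reverse).reverse := by
  have h1 : pvSq n ((pvT g).map List.reverse) := pvSq_maprev n _ (pvSq_T n g hg)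
  apply pvEq_of_entries n _ _ (pvSq_rotG n _ h1) (pvSq_rev n _ (pvSq_maprev n g hg))
  intro x y hx hy
  rw [pvE_rotG n _ x y h1 hx hy, pvE_maprev n _ (n - 1 - y) x (pvSq_T n g hg) (by omega) hx,
      pvE_T n g (n - 1 - y) (n - 1 - x) hg (by omega) (by omega),
      pvE_rev n _ x y (pvSq_maprev n g hg) hx,
      pvE_maprev n g (n - 1 - x) y hg (by omega) hy]

theorem pvRot3 (n : Nat) (g : List (List Char)) (hg : pvSq n g) :
    pvRotG ((g.map List.reverse).reverse) = (pvT g).reverse := by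
  have h2 : pvSq n ((g.map List.reverse).reverse) := pvSq_rev n _ (pvSq_maprev n g hg)
  apply pvEq_of_entries n _ _ (pvSq_rotG n _ h2) (pvSq_rev n _ (pvSq_T n g hg))
  intro x y hx hy
  rw [pvE_rotG n _ x y h2 hx hy, pvE_rev n _ (n - 1 - y) x (pvSq_maprev n g hg) (by omega),
      pvE_maprev n g (n - 1 - (n - 1 - y)) x hg (by omega) hx,
      pvE_rev n _ x y (pvSq_T n g hg) hx, pvE_T n g (n - 1 - x) y hg (by omega) hy]
  congr 2
  omega

theorem pvRot4 (n : Nat) (g : List (List Char)) (hg : pvSq n g) :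
    pvRotG ((pvT g).reverse) = g := by
  have h3 : pvSq n ((pvT g).reverse) := pvSq_rev n _ (pvSq_T n g hg)
  apply pvEq_of_entries n _ _ (pvSq_rotG n _ h3) hg
  intro x y hx hy
  rw [pvE_rotG n _ x y h3 hx hy, pvE_rev n _ (n - 1 - y) x (pvSq_T n g hg) (by omega),
      pvE_T n g (n - 1 - (n - 1 - y)) x hg (by omega) hx]
  congr 1
  omega

theorem pvSortedSetCongr (L1 L2 : List String) (h : ∀ s, s ∈ L1 ↔ s ∈ L2) :
    PySem.List.sorted (PySem.Set.ofList L1) (fun s => s) false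
      = PySem.List.sorted (PySem.Set.ofList L2) (fun s => s) false := by
  apply PySem.List.sorted_eq_sorted_of_perm _ _ _ (fun a b hab => hab)
  refine (List.perm_ext_iff_of_nodup (PySem.Set.nodup_ofList L1) (PySem.Set.nodup_ofList L2)).2 ?_
  intro a; simp [PySem.Set.mem_ofList, h]

theorem pvGridEq (g0 : List (List Char)) (hsq : pvSq g0.length g0) :
    PySem.List.sorted
      (PySem.Set.ofList
        (((List.range 4).foldl
            (fun (st : List (List Char) × List (List (List Char))) _ =>
              let grid := pvRotA st.1
              (grid, st.2 ++ [grid] ++ [grid.reverse]))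
            (g0, [])).2.map (fun g => String.ofList (PySem.Chars.join ['/'] g))))
      (fun s => s) false
    = PySem.List.sorted
      (PySem.Set.ofList
        (([g0, pvT g0].foldl
            (fun (acc : List (List (List Char))) base =>
              let flipped := base.map List.reverse
              acc ++ [base, base.reverse, flipped, flipped.reverse]) []).map
          (fun x => String.ofList (PySem.Chars.join ['/'] x))))
      (fun s => s) false := by
  have h4 : (List.range 4) = [0, 1, 2, 3] := by decide
  rw [h4]
  simp only [List.foldl_cons, List.foldl_nil, List.append_assoc, List.cons_append,
    List.nil_append]
  rw [pvRotA_eq g0, pvRot1 g0.length g0 hsq, pvRotA_eq, pvRot2 g0.length g0 hsq,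
      pvRotA_eq, pvRot3 g0.length g0 hsq, pvRotA_eq, pvRot4 g0.length g0 hsq]
  apply pvSortedSetCongr
  intro s
  simp only [List.map_cons, List.map_nil, List.mem_cons, List.not_mem_nil, or_false,
    List.reverse_reverse]
  constructor
  · rintro (h|h|h|h|h|h|h|h)
    · exact Or.inr (Or.inr (Or.inr (Or.inr (Or.inr (Or.inr (Or.inl h))))))
    · exact Or.inr (Or.inr (Or.inr (Or.inr (Or.inr (Or.inr (Or.inr h))))))
    · exact Or.inr (Or.inr (Or.inr (Or.inl h)))
    · exact Or.inr (Or.inr (Or.inl h))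
    · exact Or.inr (Or.inr (Or.inr (Or.inr (Or.inr (Or.inl h)))))
    · exact Or.inr (Or.inr (Or.inr (Or.inr (Or.inl h))))
    · exact Or.inl h
    · exact Or.inr (Or.inl h)
  · rintro (h|h|h|h|h|h|h|h)
    · exact Or.inr (Or.inr (Or.inr (Or.inr (Or.inr (Or.inr (Or.inl h))))))
    · exact Or.inr (Or.inr (Or.inr (Or.inr (Or.inr (Or.inr (Or.inr h))))))
    · exact Or.inr (Or.inr (Or.inr (Or.inl h)))
    · exact Or.inr (Or.inr (Or.inl h))
    · exact Or.inr (Or.inr (Or.inr (Or.inr (Or.inr (Or.inl h)))))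
    · exact Or.inr (Or.inr (Or.inr (Or.inr (Or.inl h))))
    · exact Or.inl h
    · exact Or.inr (Or.inl h)

theorem pvRotG_rep (N : Nat) :
    pvRotG (List.replicate N ([] : List Char)) = List.replicate N [] := by
  unfold pvRotG
  rw [List.eq_replicate_iff]
  constructor
  · simp
  · intro b hb
    simp only [List.mem_map, List.mem_range] at hb
    obtain ⟨x, hx, rfl⟩ := hb
    simp

theorem pvSortedDup8 (a : String) :
    PySem.List.sorted (PySem.Set.ofList [a, a, a, a, a, a, a, a]) (fun s => s) false = [a] := by
  have h : PySem.Set.ofList [a, a, a, a, a, a, a, a] = [a] := by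
    simp [PySem.Set.ofList, PySem.Set.add]
  rw [h]
  exact PySem.List.sorted_id_eq_of_perm_of_pairwise _ _ (List.Perm.refl _)
    (List.pairwise_singleton _ _)

theorem pvAEmpty (g0 : List (List Char)) (hemp : ∀ r ∈ g0, r = []) :
    PySem.List.sorted
      (PySem.Set.ofList
        (((List.range 4).foldl
            (fun (st : List (List Char) × List (List (List Char))) _ =>
              let grid := pvRotA st.1
              (grid, st.2 ++ [grid] ++ [grid.reverse]))
            (g0, [])).2.map (fun g => String.ofList (PySem.Chars.join ['/'] g))))
      (fun s => s) false
    = [String.ofList (PySem.Chars.join ['/'] g0)] := by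
  have hg : g0 = List.replicate g0.length [] :=
    List.eq_replicate_iff.mpr ⟨by simp, hemp⟩
  rw [hg]
  have h1 : pvRotA (List.replicate g0.length ([] : List Char))
      = List.replicate g0.length [] := by rw [pvRotA_eq, pvRotG_rep]
  have h2 : (List.replicate g0.length ([] : List Char)).reverse
      = List.replicate g0.length [] := List.reverse_replicate ..
  have hr4 : (List.range 4) = [0, 1, 2, 3] := by decide
  rw [hr4]
  simp only [List.foldl_cons, List.foldl_nil, h1, h2, List.nil_append, List.append_assoc,
    List.cons_append, List.map_cons, List.map_nil]
  exact pvSortedDup8 _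

theorem pvMainEq (pattern : String)
    (hpre : Pre_get_all_symmetries pattern) :
    get_all_symmetries pattern = get_all_symmetries_alt pattern := by
  unfold get_all_symmetries get_all_symmetries_alt
  by_cases hall : ∀ r ∈ PySem.Chars.splitOn pattern.toList ['/'], r = []
  · have hcond : (PySem.Chars.splitOn pattern.toList ['/']).all List.isEmpty = true :=
      List.all_eq_true.mpr (fun r hr => by simp [hall r hr])
    refine (pvAEmpty _ hall).trans ?_
    simp only [hcond, if_true]
  · rcases hpre with hsq | hemp
    · have h1 : (PySem.Chars.splitOn pattern.toList ['/']).all List.isEmpty = false := by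
        rw [Bool.eq_false_iff]
        intro hc
        exact hall (fun r hr => List.isEmpty_iff.mp (List.all_eq_true.mp hc r hr))
      have h2 : (PySem.Chars.splitOn pattern.toList ['/']).any
          (fun r => decide (r.length ≠ (PySem.Chars.splitOn pattern.toList ['/']).length))
          = false := by
        rw [Bool.eq_false_iff]
        intro hc
        obtain ⟨r, hr, hne⟩ := List.any_eq_true.mp hc
        exact (of_decide_eq_true hne) (hsq r hr)
      simp only [h1, h2, Bool.false_eq_true, if_false]
      exact pvGridEq (PySem.Chars.splitOn pattern.toList ['/']) ⟨rfl, hsq⟩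
    · exact absurd (fun r hr => List.length_eq_zero_iff.mp (hemp r hr)) hall

-- ===== VERDICT (by name: the statement is the Claim_ definition above) =====
theorem get_all_symmetries_spec : Claim_equal_get_all_symmetries := by
  intro pattern _ hpre
  unfold Spec_get_all_symmetries
  exact pvMainEq pattern hpre
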